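-- pv_equiv track=rewrite | github.com/louislaugier/python-cours | rendu.py | exo_2_plus
-- ===== SOURCE A (Python) =====
-- def exo_2_plus(operations: [], initialBalance=0) -> int:
--     liste_depenses = []
--     liste_revenus = []
--     for element in operations:
--         if element[0] == "D":
--             depenses = int(element[2:])
--             liste_depenses.append(depenses)
--             print ("Exo 2+) Les dépenses sont de :", sum(liste_depenses))
--         elif element[0] == "R":
--             revenus = int(element[2:])
--             liste_revenus.append(revenus)
--             print ("Exo 2+) Les revenus sont de :",sum(liste_revenus))
--     print ("Exo 2+) Le solde de votre compte est de :", initialBalance + sum(liste_revenus) - sum(liste_depenses))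
--     return initialBalance + sum(liste_revenus) - sum(liste_depenses)
-- ===== SOURCE B (Python) =====
-- def exo_2_plus(operations: [], initialBalance=0) -> int:
--     # Return value only: the balance is initialBalance plus the sum of signed
--     # deltas (+amount for "R ..", -amount for "D ..", 0 otherwise); A's running
--     # progress printing is omitted (side-effect difference noted in the claim).
--     def delta(op):
--         if op[0] == "D":
--             return -int(op[2:])
--         if op[0] == "R":
--             return int(op[2:])
--         return 0
--     return initialBalance + sum(map(delta, operations))
-- ===== Notes on version B (the rewrite author's own statement) =====
-- stated objective: simpler
-- what changed: B maps each operation to a signed integer delta and returns initialBalance plus one sum, instead of appending to two lists and re-summing both lists on every iteration; B omits A's progress printing (return value is unchanged).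
import Mathlib
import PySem

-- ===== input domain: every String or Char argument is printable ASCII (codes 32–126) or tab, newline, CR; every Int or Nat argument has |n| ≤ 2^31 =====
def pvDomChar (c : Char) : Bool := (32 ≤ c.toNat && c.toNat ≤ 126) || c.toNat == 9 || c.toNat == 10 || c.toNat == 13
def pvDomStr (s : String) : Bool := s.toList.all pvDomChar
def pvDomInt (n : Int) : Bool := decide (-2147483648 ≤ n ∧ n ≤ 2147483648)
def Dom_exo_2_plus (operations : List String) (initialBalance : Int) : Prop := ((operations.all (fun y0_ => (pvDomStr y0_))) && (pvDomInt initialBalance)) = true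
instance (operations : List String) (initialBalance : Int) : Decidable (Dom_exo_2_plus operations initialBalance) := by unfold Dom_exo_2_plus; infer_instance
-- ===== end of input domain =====

-- B maps each operation to a signed delta and returns initialBalance plus one sum,
-- replacing A's two appended lists re-summed each step (objective: simpler; the
-- equivalence is about the RETURN value only — A also prints running totals, B does not).

-- ===== PORT A =====
-- int(element[2:]) ported as ofStr? of the slice; the .getD 0 default is only reached
-- where the Python raises ValueError, which Pre_ excludes; likewise the pyGet? none
-- branch is Python's IndexError on element[0], excluded by Pre_.
def exo_2_plus (operations : List String) (initialBalance : Int) : Int :=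
  let st := operations.foldl
    (fun (st : List Int × List Int) element =>
      match PySem.Str.pyGet? element 0 with
      | some c =>
        if c = 'D' then
          (st.1 ++ [(PySem.Int.ofStr? (PySem.Str.slice element (some 2) none)).getD 0], st.2)
        else if c = 'R' then
          (st.1, st.2 ++ [(PySem.Int.ofStr? (PySem.Str.slice element (some 2) none)).getD 0])
        else st
      | none => st)
    ([], [])
  initialBalance + st.2.sum - st.1.sum

-- ===== PORT B =====
-- B's helper delta(op): +amount for "R", -amount for "D", 0 otherwise; same PySem
-- primitives for op[0] and int(op[2:]) as in Source B, with the raising cases outside Pre_.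
def pvDelta (op : String) : Int :=
  match PySem.Str.pyGet? op 0 with
  | some 'D' => -((PySem.Int.ofStr? (PySem.Str.slice op (some 2) none)).getD 0)
  | some 'R' => (PySem.Int.ofStr? (PySem.Str.slice op (some 2) none)).getD 0
  | _ => 0

def exo_2_plus_alt (operations : List String) (initialBalance : Int) : Int :=
  initialBalance + (operations.map pvDelta).sum

-- ===== PRECONDITION & SPEC =====
-- Pre_ excludes exactly the inputs where Python A raises: an empty operation string
-- (IndexError on element[0]) or a 'D'/'R' operation whose tail is not int()-parsable
-- (ValueError).
def Pre_exo_2_plus (operations : List String) (initialBalance : Int) : Prop :=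
  ∀ op ∈ operations, op ≠ "" ∧
    ((PySem.Str.pyGet? op 0 = some 'D' ∨ PySem.Str.pyGet? op 0 = some 'R') →
      (PySem.Int.ofStr? (PySem.Str.slice op (some 2) none)).isSome)
instance (operations : List String) (initialBalance : Int) : Decidable (Pre_exo_2_plus operations initialBalance) := by unfold Pre_exo_2_plus; infer_instance
def pvWitness_exo_2_plus : List String × Int := (["D 5", "R 3"], 1)

def Spec_exo_2_plus (operations : List String) (initialBalance : Int) (out : Int) : Prop := out = exo_2_plus_alt operations initialBalance
instance (operations : List String) (initialBalance : Int) (out : Int) : Decidable (Spec_exo_2_plus operations initialBalance out) := by unfold Spec_exo_2_plus; infer_instance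

-- ===== CLAIM (what is proved, stated in full; the proofs are below) =====
def Claim_equal_exo_2_plus : Prop := ∀ (operations : List String) (initialBalance : Int), Dom_exo_2_plus operations initialBalance → Pre_exo_2_plus operations initialBalance → Spec_exo_2_plus operations initialBalance (exo_2_plus operations initialBalance)

-- ===== LEMMAS AND PROOFS =====

-- Invariant over A's fold: income minus expenses advances by exactly pvDelta per step.
theorem fold_inv (ops : List String) (d r : List Int) :
    ((ops.foldl
      (fun (st : List Int × List Int) element =>
        match PySem.Str.pyGet? element 0 with
        | some c =>
          if c = 'D' then
            (st.1 ++ [(PySem.Int.ofStr? (PySem.Str.slice element (some 2) none)).getD 0], st.2)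
          else if c = 'R' then
            (st.1, st.2 ++ [(PySem.Int.ofStr? (PySem.Str.slice element (some 2) none)).getD 0])
          else st
        | none => st)
      (d, r)).2.sum -
     (ops.foldl
      (fun (st : List Int × List Int) element =>
        match PySem.Str.pyGet? element 0 with
        | some c =>
          if c = 'D' then
            (st.1 ++ [(PySem.Int.ofStr? (PySem.Str.slice element (some 2) none)).getD 0], st.2)
          else if c = 'R' then
            (st.1, st.2 ++ [(PySem.Int.ofStr? (PySem.Str.slice element (some 2) none)).getD 0])
          else st
        | none => st)
      (d, r)).1.sum) = r.sum - d.sum + (ops.map pvDelta).sum := by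
  induction ops generalizing d r with
  | nil => simp
  | cons op ops ih =>
    simp only [List.foldl_cons, List.map_cons, List.sum_cons]
    rcases h0 : PySem.Str.pyGet? op 0 with _ | c
    · simp only [pvDelta, h0]
      rw [ih d r]; ring
    · by_cases hD : c = 'D'
      · subst hD
        simp only [pvDelta, h0, if_true, Char.reduceEq, if_false]
        rw [ih (d ++ [(PySem.Int.ofStr? (PySem.Str.slice op (some 2) none)).getD 0]) r]
        simp; ring
      · by_cases hR : c = 'R'
        · subst hR
          simp only [pvDelta, h0, if_true, Char.reduceEq, if_false]
          rw [ih d (r ++ [(PySem.Int.ofStr? (PySem.Str.slice op (some 2) none)).getD 0])]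
          simp; ring
        · have hd0 : pvDelta op = 0 := by
            unfold pvDelta; rw [h0]
            split
            · next h => exact absurd (by injection h) hD
            · next h => exact absurd (by injection h) hR
            · rfl
          simp only [if_neg hD, if_neg hR, hd0]
          rw [ih d r]; ring

-- ===== VERDICT (by name: the statement is the Claim_ definition above) =====
theorem exo_2_plus_spec : Claim_equal_exo_2_plus := by
  intro operations initialBalance _ _
  unfold Spec_exo_2_plus exo_2_plus exo_2_plus_alt
  have h := fold_inv operations [] []
  simp only [List.sum_nil] at h
  dsimp only
  omega
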